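-- pv_equiv track=rewrite | github.com/GTBoon72/Euler | Problem36/DoubleBasePalindromes.py | PalindromesInBothBases
-- ===== SOURCE A (Python) =====
-- def __isPalindrome(x):
--   if x==x[::-1]:
--     return True
--   return False
--
-- def isPalindromeInBothBases(n: int):
--   if __isPalindrome(bin(n).replace("0b", "")) and __isPalindrome(str(n)):
--     return True
--   return False
--
-- def PalindromesInBothBases(maximum: int):
--   if not 0<maximum<10**7+1:
--     raise ValueError("Input should be an integer between 0 and 10**7")
--   PiBB=[]
--   for i in range(1,maximum):
--     if isPalindromeInBothBases(i):
--       PiBB.append(i)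
--   return PiBB
-- ===== SOURCE B (Python) =====
-- def PalindromesInBothBases(maximum: int):
--     if not 0 < maximum < 10**7 + 1:
--         raise ValueError("Input should be an integer between 0 and 10**7")
--
--     def _rev(n, base):
--         r = 0
--         while n > 0:
--             r = r * base + n % base
--             n //= base
--         return r
--
--     out = []
--     nd = len(str(maximum - 1))
--     for L in range(1, nd + 1):
--         half = (L + 1) // 2
--         for h in range(10 ** (half - 1), 10 ** half):
--             p = h * 10 ** (L - half) + _rev(h // 10 ** (2 * half - L), 10)
--             if p < maximum and _rev(p, 2) == p:
--                 out.append(p)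
--     return out
-- ===== Notes on version B (the rewrite author's own statement) =====
-- stated objective: faster
-- what changed: Instead of scanning every integer below maximum and string-testing both bases, B generates only the decimal palindromes (mirroring each possible half, length by length, in increasing order) with an arithmetic digit-reversal helper, and keeps those below maximum that are binary palindromes.
import Mathlib
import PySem

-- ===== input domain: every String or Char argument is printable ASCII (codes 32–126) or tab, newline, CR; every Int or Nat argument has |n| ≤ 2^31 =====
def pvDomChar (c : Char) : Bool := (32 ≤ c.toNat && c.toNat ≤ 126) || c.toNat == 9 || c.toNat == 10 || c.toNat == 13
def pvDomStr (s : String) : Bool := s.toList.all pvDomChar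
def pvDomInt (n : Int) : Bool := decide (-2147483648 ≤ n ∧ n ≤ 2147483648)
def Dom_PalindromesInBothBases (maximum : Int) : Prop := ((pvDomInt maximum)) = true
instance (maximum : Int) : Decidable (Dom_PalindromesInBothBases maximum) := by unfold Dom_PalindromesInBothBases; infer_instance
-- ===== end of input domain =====

-- B replaces A's scan of every integer below `maximum` by generation of the decimal
-- palindromes only (mirroring each possible half), testing each for binary palindromicity:
-- asymptotically fewer candidates, measured far faster at the large sizes.

-- ===== PORT A =====

-- __isPalindrome: x == x[::-1]  (slice? with step -1 never returns none)
def pyIsPalindrome (x : String) : Bool :=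
  match PySem.Str.slice? x none none (-1) with
  | some r => x == r
  | none => false

def isPalindromeInBothBases (n : Int) : Bool :=
  pyIsPalindrome (PySem.Str.replace (PySem.Int.pyBin n) "0b" "") && pyIsPalindrome (PySem.Int.toStr n)

-- A raises ValueError unless 0 < maximum < 10**7 + 1: those inputs are excluded by Pre_.
def PalindromesInBothBases (maximum : Int) : List Int :=
  (PySem.List.pyRange 1 maximum 1).foldl
    (fun PiBB i => if isPalindromeInBothBases i then PiBB ++ [i] else PiBB) []

-- ===== PORT B =====

-- the `while n > 0` loop of _rev; the `2 ≤ base` guard only makes the recursion total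
-- (both call sites pass base = 10 or base = 2, where it is exactly the Python loop)
def pyRevLoop (base n r : Int) : Int :=
  if _h : 2 ≤ base ∧ 0 < n then
    pyRevLoop base (PySem.Int.floordiv n base) (r * base + PySem.Int.mod n base)
  else r
termination_by n.toNat
decreasing_by
  rcases _h with ⟨hb, hn⟩
  rw [PySem.Int.floordiv_eq_ediv_of_pos (by omega)]
  have h1 : n / base < n := by
    apply Int.ediv_lt_of_lt_mul (by omega)
    nlinarith
  have _h2 : 0 ≤ n / base := Int.ediv_nonneg (by omega) (by omega)
  omega

def pyRev (n base : Int) : Int := pyRevLoop base n 0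

-- all three exponents are ≥ 0 for every L the loop visits, so `.toNat` is exact for Python's **
def PalindromesInBothBases_alt (maximum : Int) : List Int :=
  let nd := PySem.Str.len (PySem.Int.toStr (maximum - 1))
  (PySem.List.pyRange 1 (nd + 1) 1).foldl (fun out L =>
    let half := PySem.Int.floordiv (L + 1) 2
    (PySem.List.pyRange (10 ^ (half - 1).toNat) (10 ^ half.toNat) 1).foldl (fun out h =>
      let p := h * 10 ^ (L - half).toNat +
        pyRev (PySem.Int.floordiv h (10 ^ (2 * half - L).toNat)) 10
      if p < maximum && (pyRev p 2 == p) then out ++ [p] else out) out) []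

-- ===== PRECONDITION & SPEC =====

-- exactly the inputs A's guard lets through (elsewhere A raises ValueError)
def Pre_PalindromesInBothBases (maximum : Int) : Prop := 0 < maximum ∧ maximum < 10 ^ 7 + 1
instance (maximum : Int) : Decidable (Pre_PalindromesInBothBases maximum) := by
  unfold Pre_PalindromesInBothBases; infer_instance

def pvWitness_PalindromesInBothBases : Int := 100

def Spec_PalindromesInBothBases (maximum : Int) (out : List Int) : Prop := out = PalindromesInBothBases_alt maximum
instance (maximum : Int) (out : List Int) : Decidable (Spec_PalindromesInBothBases maximum out) := by unfold Spec_PalindromesInBothBases; infer_instance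

-- ===== CLAIM (what is proved, stated in full; the proofs are below) =====
def Claim_equal_PalindromesInBothBases : Prop := ∀ (maximum : Int), Dom_PalindromesInBothBases maximum → Pre_PalindromesInBothBases maximum → Spec_PalindromesInBothBases maximum (PalindromesInBothBases maximum)


-- ===== LEMMAS AND PROOFS =====

-- ---------- string-side characterisation of A's tests ----------

theorem toDigitsCore_eq (b : ℕ) (hb : 1 < b) :
    ∀ (fuel n : ℕ) (ds : List Char), 0 < n → n ≤ fuel →
    Nat.toDigitsCore b fuel n ds = ((Nat.digits b n).map Nat.digitChar).reverse ++ ds := by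
  intro fuel
  induction fuel with
  | zero => intro n ds hn hf; omega
  | succ f ih =>
    intro n ds hn hf
    rw [Nat.digits_def' hb hn]
    by_cases hz : n / b = 0
    · simp [Nat.toDigitsCore, hz]
    · have h1 : 0 < n / b := Nat.pos_of_ne_zero hz
      have h2 : n / b ≤ f := by
        have := Nat.div_lt_self hn hb
        omega
      rw [Nat.toDigitsCore]
      simp only [hz, if_false]
      rw [ih (n / b) _ h1 h2]
      simp

theorem toDigits_eq (b : ℕ) (hb : 1 < b) (n : ℕ) (hn : 0 < n) :
    Nat.toDigits b n = ((Nat.digits b n).map Nat.digitChar).reverse := by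
  rw [Nat.toDigits, toDigitsCore_eq b hb (n+1) n [] hn (by omega), List.append_nil]

theorem digitChar_decode (d : ℕ) (h : d < 10) : (Nat.digitChar d).toNat - 48 = d := by
  interval_cases d <;> rfl

theorem map_digitChar_inj (L M : List ℕ) (hL : ∀ d ∈ L, d < 10) (hM : ∀ d ∈ M, d < 10)
    (h : L.map Nat.digitChar = M.map Nat.digitChar) : L = M := by
  have dec : ∀ (K : List ℕ), (∀ d ∈ K, d < 10) → (K.map Nat.digitChar).map (fun c => c.toNat - 48) = K := by
    intro K hK
    rw [List.map_map]
    have : ∀ d ∈ K, ((fun c => Char.toNat c - 48) ∘ Nat.digitChar) d = id d := by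
      intro d hd
      simpa using digitChar_decode d (hK d hd)
    simpa using List.map_congr_left this
  rw [← dec L hL, ← dec M hM, h]

theorem pyIsPalindrome_iff (x : String) :
    pyIsPalindrome x = true ↔ x.toList = x.toList.reverse := by
  rw [pyIsPalindrome, PySem.Str.slice?_none_none_neg_one]
  simp only [beq_iff_eq]
  constructor
  · intro h; conv_lhs => rw [h]
    rw [String.toList_ofList]
  · intro h
    apply String.toList_inj.mp
    rw [String.toList_ofList, ← h]

theorem replace_go_no_match (fuel : ℕ) :
    ∀ (ds acc : List Char), ('b' ∉ ds) →
    PySem.Chars.replace.go ['0','b'] [] fuel ds acc = acc.reverse ++ ds := by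
  induction fuel with
  | zero => intro ds acc _; simp [PySem.Chars.replace.go]
  | succ f ih =>
    intro ds acc hb
    match ds with
    | [] => simp [PySem.Chars.replace.go]
    | c :: t =>
      have hpre : List.isPrefixOf ['0','b'] (c :: t) = false := by
        match t with
        | [] => simp [List.isPrefixOf]
        | c2 :: t2 =>
          have h2 : c2 ≠ 'b' := by intro h; exact hb (by simp [h])
          simp only [List.isPrefixOf]
          simp
          intro _ h
          exact h2 h.symm
      have hbt : 'b' ∉ t := fun h => hb (List.mem_cons_of_mem _ h)
      simp only [PySem.Chars.replace.go, hpre]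
      rw [ih t (c :: acc) hbt]
      simp

theorem no_b_in_toDigits (b n : ℕ) (hb : b ≤ 10) (hb1 : 1 < b) (hn : 0 < n) : 'b' ∉ Nat.toDigits b n := by
  rw [toDigits_eq b hb1 n hn]
  intro hmem
  simp only [List.mem_reverse, List.mem_map] at hmem
  obtain ⟨d, hd, hdc⟩ := hmem
  have : d < b := Nat.digits_lt_base hb1 hd
  have hd10 : d < 10 := by omega
  interval_cases d <;> exact absurd hdc (by decide)

theorem replace_pyBin (n : ℕ) (hn : 0 < n) :
    (PySem.Str.replace (PySem.Int.pyBin (n : ℤ)) "0b" "").toList = Nat.toDigits 2 n := by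
  have hds : 'b' ∉ Nat.toDigits 2 n := no_b_in_toDigits 2 n (by omega) (by omega) hn
  rw [PySem.Str.replace, String.toList_ofList, PySem.Int.pyBin, String.toList_ofList,
    PySem.Int.toBinChars0b]
  simp only [if_neg (by omega : ¬(n : ℤ) < 0), Int.toNat_natCast]
  rw [PySem.Chars.replace]
  have hold : ("0b".toList) = ['0','b'] := rfl
  have hnew : ("".toList) = ([] : List Char) := rfl
  rw [hold, hnew]
  simp only [List.isEmpty_cons]
  have hpre : List.isPrefixOf ['0','b'] ('0' :: 'b' :: Nat.toDigits 2 n) = true := by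
    simp [List.isPrefixOf]
  simp only [List.length_cons]
  rw [PySem.Chars.replace.go]
  simp only [hpre, if_true]
  simp only [List.reverse_nil, List.nil_append]
  exact replace_go_no_match _ _ [] hds

theorem digits_pal_of_chars (b n : ℕ) (hb : 1 < b) (hb10 : b ≤ 10) :
    (((Nat.digits b n).map Nat.digitChar).reverse = (((Nat.digits b n).map Nat.digitChar).reverse).reverse
      ↔ Nat.digits b n = (Nat.digits b n).reverse) := by
  rw [List.reverse_reverse]
  constructor
  · intro h
    have hlt : ∀ d ∈ Nat.digits b n, d < 10 := fun d hd => by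
      have := Nat.digits_lt_base hb hd; omega
    have hlt' : ∀ d ∈ (Nat.digits b n).reverse, d < 10 := fun d hd => hlt d (List.mem_reverse.mp hd)
    have := map_digitChar_inj _ _ hlt' hlt (by rw [List.map_reverse, h])
    exact this.symm
  · intro h; conv_rhs => rw [h]
    rw [List.map_reverse]

theorem toStr_toList (n : ℕ) : (PySem.Int.toStr (n : ℤ)).toList = Nat.toDigits 10 n := by
  rw [PySem.Int.toList_toStr, PySem.Int.toChars]
  simp [if_neg (by omega : ¬(n : ℤ) < 0)]

theorem predA_iff (n : ℕ) (hn : 0 < n) :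
    (isPalindromeInBothBases (n : ℤ) = true) ↔
    (Nat.digits 2 n = (Nat.digits 2 n).reverse ∧ Nat.digits 10 n = (Nat.digits 10 n).reverse) := by
  rw [isPalindromeInBothBases, Bool.and_eq_true, pyIsPalindrome_iff, pyIsPalindrome_iff,
    replace_pyBin n hn, toStr_toList, toDigits_eq 2 (by omega) n hn, toDigits_eq 10 (by omega) n hn,
    digits_pal_of_chars 2 n (by omega) (by omega), digits_pal_of_chars 10 n (by omega) (by omega)]

-- ---------- B's digit-reversal loop ----------

theorem pyRevLoop_eq (b : ℕ) (hb : 2 ≤ b) (n : ℕ) (r : ℤ) :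
    pyRevLoop (b : ℤ) (n : ℤ) r =
      ((Nat.ofDigits b (Nat.digits b n).reverse : ℕ) : ℤ) + r * (b : ℤ) ^ (Nat.digits b n).length := by
  induction n using Nat.strong_induction_on generalizing r with
  | _ n ih =>
    rw [pyRevLoop]
    by_cases hn : 0 < n
    · rw [dif_pos ⟨by exact_mod_cast hb, by exact_mod_cast hn⟩]
      rw [PySem.Int.floordiv_natCast, PySem.Int.mod_natCast]
      rw [ih (n / b) (Nat.div_lt_self hn (by omega)) _]
      rw [Nat.digits_def' (by omega : 1 < b) hn]
      simp only [List.reverse_cons, List.length_cons]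
      rw [Nat.ofDigits_append]
      push_cast
      simp only [Nat.ofDigits, List.length_reverse]
      push_cast
      ring
    · have : n = 0 := by omega
      subst this
      rw [dif_neg (by simp)]
      simp

theorem pyRev_eq (b n : ℕ) (hb : 2 ≤ b) :
    pyRev (n : ℤ) (b : ℤ) = ((Nat.ofDigits b (Nat.digits b n).reverse : ℕ) : ℤ) := by
  rw [pyRev, pyRevLoop_eq b hb n 0]
  ring

theorem rev_fixed_iff (b n : ℕ) (hb : 1 < b) (hn : 0 < n) :
    Nat.ofDigits b (Nat.digits b n).reverse = n ↔ Nat.digits b n = (Nat.digits b n).reverse := by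
  constructor
  · intro h
    have hdef : Nat.digits b n = n % b :: Nat.digits b (n / b) := Nat.digits_def' hb hn
    by_cases h0 : n % b = 0
    · exfalso
      set t := Nat.digits b (n / b) with ht
      have hrev : (Nat.digits b n).reverse = t.reverse ++ [n % b] := by rw [hdef]; simp
      have hlt : ∀ x ∈ t.reverse, x < b := fun x hx =>
        Nat.digits_lt_base hb (by rw [hdef]; exact List.mem_cons_of_mem _ (List.mem_reverse.mp hx))
      have hsmall : Nat.ofDigits b (Nat.digits b n).reverse < b ^ t.length := by
        rw [hrev, Nat.ofDigits_append, h0]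
        simpa using Nat.ofDigits_lt_base_pow_length hb hlt
      have hlen : (Nat.digits b n).length = t.length + 1 := by rw [hdef]; simp
      have hge : b ^ t.length ≤ n := by
        have h1 := Nat.base_pow_length_digits_le b n hb (by omega)
        rw [hlen] at h1
        have h2 : b ^ (t.length + 1) = b * b ^ t.length := by ring
        rw [h2] at h1
        exact Nat.le_of_mul_le_mul_left h1 (by omega)
      omega
    · have hne : (Nat.digits b n).reverse ≠ [] := by
        simp [Nat.digits_ne_nil_iff_ne_zero.mpr (by omega : n ≠ 0)]
      have hsome : (Nat.digits b n).reverse.getLast? = some (n % b) := by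
        rw [hdef]
        simp
      have hlast : (Nat.digits b n).reverse.getLast hne ≠ 0 := by
        intro hz
        rw [List.getLast?_eq_some_getLast hne, hz] at hsome
        exact h0 (Option.some.inj hsome).symm
      have hlt : ∀ x ∈ (Nat.digits b n).reverse, x < b := fun x hx =>
        Nat.digits_lt_base hb (List.mem_reverse.mp hx)
      have := Nat.digits_ofDigits b hb _ hlt (fun _ => hlast)
      rw [h] at this
      conv_lhs => rw [this]
  · intro h
    conv_lhs => rw [← h]
    exact Nat.ofDigits_digits b n

-- ---------- the half-mirroring bijection with decimal palindromes ----------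

def mirN (l h : ℕ) : ℕ :=
  h * 10 ^ (l - (l + 1) / 2) +
    Nat.ofDigits 10 (Nat.digits 10 (h / 10 ^ (2 * ((l + 1) / 2) - l))).reverse

theorem digits_len_eq (h hf : ℕ) (hlo : 10 ^ (hf - 1) ≤ h) (hhi : h < 10 ^ hf) (hf1 : 1 ≤ hf) :
    (Nat.digits 10 h).length = hf := by
  have h1 : (Nat.digits 10 h).length ≤ hf := (Nat.digits_length_le_iff (by omega) h).mpr hhi
  by_contra hne
  have h2 : (Nat.digits 10 h).length ≤ hf - 1 := by omega
  have := (Nat.digits_length_le_iff (by omega : (1:ℕ) < 10) h).mp h2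
  omega

theorem pal_glue (e : List ℕ) (k : ℕ) (hk : k = 0 ∨ k = 1) :
    e.reverse ++ e.drop k = (e.drop k).reverse ++ e := by
  rcases hk with rfl | rfl
  · simp
  · match e with
    | [] => simp
    | d0 :: t => simp

theorem digits_mirN (l h : ℕ) (hl : 1 ≤ l)
    (hlo : 10 ^ ((l + 1) / 2 - 1) ≤ h) (hhi : h < 10 ^ ((l + 1) / 2)) :
    Nat.digits 10 (mirN l h) =
      ((Nat.digits 10 h).drop (2 * ((l + 1) / 2) - l)).reverse ++ Nat.digits 10 h := by
  set hf := (l + 1) / 2 with hhf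
  set k := 2 * hf - l with hk
  have hf1 : 1 ≤ hf := by omega
  have hk01 : k = 0 ∨ k = 1 := by omega
  have hh0 : 0 < h := lt_of_lt_of_le (by positivity) hlo
  have hlen : (Nat.digits 10 h).length = hf := digits_len_eq h hf hlo hhi hf1
  set e := Nat.digits 10 h with he
  have hdiv : Nat.digits 10 (h / 10 ^ k) = e.drop k := by
    rcases hk01 with h0 | h1
    · rw [h0]; simpa using he.symm
    · rw [h1]
      have := Nat.digits_def' (by omega : (1:ℕ) < 10) hh0
      rw [pow_one]
      rw [he, this]
      simp
  have hlt : ∀ x ∈ (e.drop k).reverse ++ e, x < 10 := by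
    intro x hx
    rcases List.mem_append.mp hx with hx | hx
    · exact Nat.digits_lt_base (by omega) (List.mem_of_mem_drop (List.mem_reverse.mp hx))
    · exact Nat.digits_lt_base (by omega) hx
  have hne : e ≠ [] := by
    rw [he]; exact Nat.digits_ne_nil_iff_ne_zero.mpr (by omega)
  have hne2 : (e.drop k).reverse ++ e ≠ [] := fun hcon => hne (List.append_eq_nil_iff.mp hcon).2
  have hlast : ∀ (hh : (e.drop k).reverse ++ e ≠ []), ((e.drop k).reverse ++ e).getLast hh ≠ 0 := by
    intro hh
    rw [List.getLast_append_of_ne_nil hh hne]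
    exact Nat.getLast_digit_ne_zero 10 (by omega)
  have hval : mirN l h = Nat.ofDigits 10 ((e.drop k).reverse ++ e) := by
    rw [Nat.ofDigits_append, mirN]
    have hlenA : (e.drop k).reverse.length = l - hf := by
      simp [List.length_drop, hlen]; omega
    rw [hlenA]
    have : Nat.ofDigits 10 e = h := by rw [he]; exact Nat.ofDigits_digits 10 h
    rw [← hk, hdiv, this]
    ring
  rw [hval, Nat.digits_ofDigits 10 (by omega) _ hlt hlast]

theorem len_to_bounds (n l : ℕ) (h : (Nat.digits 10 n).length = l) (hl : 1 ≤ l) :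
    10 ^ (l - 1) ≤ n ∧ n < 10 ^ l := by
  constructor
  · by_contra hcon
    have := (Nat.digits_length_le_iff (by omega : (1:ℕ) < 10) n).mpr (by omega : n < 10 ^ (l-1))
    omega
  · exact (Nat.digits_length_le_iff (by omega : (1:ℕ) < 10) n).mp (by omega)

theorem length_digits_mirN (l h : ℕ) (hl : 1 ≤ l)
    (hlo : 10 ^ ((l + 1) / 2 - 1) ≤ h) (hhi : h < 10 ^ ((l + 1) / 2)) :
    (Nat.digits 10 (mirN l h)).length = l := by
  rw [digits_mirN l h hl hlo hhi]
  have hlen : (Nat.digits 10 h).length = (l + 1) / 2 :=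
    digits_len_eq h _ hlo hhi (by omega)
  simp [List.length_drop, hlen]
  omega

theorem pal_digits_mirN (l h : ℕ) (hl : 1 ≤ l)
    (hlo : 10 ^ ((l + 1) / 2 - 1) ≤ h) (hhi : h < 10 ^ ((l + 1) / 2)) :
    Nat.digits 10 (mirN l h) = (Nat.digits 10 (mirN l h)).reverse := by
  rw [digits_mirN l h hl hlo hhi]
  rw [List.reverse_append, List.reverse_reverse]
  exact (pal_glue (Nat.digits 10 h) _ (by omega)).symm

theorem mirN_lt (l h : ℕ) (hl : 1 ≤ l)
    (hlo : 10 ^ ((l + 1) / 2 - 1) ≤ h) (hhi : h < 10 ^ ((l + 1) / 2)) :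
    h * 10 ^ (l - (l + 1) / 2) ≤ mirN l h ∧ mirN l h < (h + 1) * 10 ^ (l - (l + 1) / 2) := by
  set hf := (l + 1) / 2 with hhf
  set k := 2 * hf - l with hk
  have hh0 : 0 < h := lt_of_lt_of_le (by positivity) hlo
  have hlen : (Nat.digits 10 h).length = hf := digits_len_eq h hf hlo hhi (by omega)
  have hdiv : Nat.digits 10 (h / 10 ^ k) = (Nat.digits 10 h).drop k := by
    have hk01 : k = 0 ∨ k = 1 := by omega
    rcases hk01 with h0 | h1
    · rw [h0]; simp
    · rw [h1, pow_one, Nat.digits_def' (by omega : (1:ℕ) < 10) hh0]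
      simp
  have hrev : Nat.ofDigits 10 (Nat.digits 10 (h / 10 ^ k)).reverse < 10 ^ (l - hf) := by
    rw [hdiv]
    have := Nat.ofDigits_lt_base_pow_length (b := 10) (l := ((Nat.digits 10 h).drop k).reverse)
      (by omega) (fun x hx => Nat.digits_lt_base (by omega) (List.mem_of_mem_drop (List.mem_reverse.mp hx)))
    rwa [List.length_reverse, List.length_drop, hlen, (by omega : hf - k = l - hf)] at this
  constructor
  · exact Nat.le_add_right _ _
  · have : mirN l h = h * 10 ^ (l - hf) + Nat.ofDigits 10 (Nat.digits 10 (h / 10 ^ k)).reverse := rfl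
    rw [this]
    nlinarith [hrev]

theorem exists_half (n : ℕ) (hn : 0 < n) (hpal : Nat.digits 10 n = (Nat.digits 10 n).reverse) :
    (10 ^ (((Nat.digits 10 n).length + 1) / 2 - 1) ≤ n / 10 ^ ((Nat.digits 10 n).length - ((Nat.digits 10 n).length + 1) / 2)
      ∧ n / 10 ^ ((Nat.digits 10 n).length - ((Nat.digits 10 n).length + 1) / 2) < 10 ^ (((Nat.digits 10 n).length + 1) / 2))
    ∧ mirN (Nat.digits 10 n).length (n / 10 ^ ((Nat.digits 10 n).length - ((Nat.digits 10 n).length + 1) / 2)) = n := by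
  set d := Nat.digits 10 n with hd
  set l := d.length with hl
  set hf := (l + 1) / 2 with hhf
  have hl1 : 1 ≤ l := by
    have hne : d ≠ [] := by rw [hd]; exact Nat.digits_ne_nil_iff_ne_zero.mpr (by omega)
    have := List.length_pos_of_ne_nil hne
    omega
  have hlt : ∀ x ∈ d, x < 10 := fun x hx => Nat.digits_lt_base (by omega) hx
  have hsplit : n = Nat.ofDigits 10 (d.take (l - hf)) + 10 ^ (l - hf) * Nat.ofDigits 10 (d.drop (l - hf)) := by
    have hlen : (d.take (l - hf)).length = l - hf := by rw [List.length_take]; omega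
    conv_lhs => rw [← Nat.ofDigits_digits 10 n, ← hd, ← List.take_append_drop (l - hf) d]
    rw [Nat.ofDigits_append, hlen]
  have htake_lt : Nat.ofDigits 10 (d.take (l - hf)) < 10 ^ (l - hf) := by
    have := Nat.ofDigits_lt_base_pow_length (b := 10) (l := d.take (l - hf))
      (by omega) (fun x hx => hlt x (List.mem_of_mem_take hx))
    have hlen : (d.take (l - hf)).length = l - hf := by rw [List.length_take]; omega
    rwa [hlen] at this
  have hdivh : n / 10 ^ (l - hf) = Nat.ofDigits 10 (d.drop (l - hf)) := by
    conv_lhs => rw [hsplit]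
    rw [Nat.add_mul_div_left _ _ (by positivity), Nat.div_eq_of_lt htake_lt, zero_add]
  have hdrop_ne : d.drop (l - hf) ≠ [] := by
    intro hcon
    have := List.drop_eq_nil_iff.mp hcon
    omega
  have hdigits_h : Nat.digits 10 (n / 10 ^ (l - hf)) = d.drop (l - hf) := by
    rw [hdivh]
    apply Nat.digits_ofDigits 10 (by omega) _ (fun x hx => hlt x (List.mem_of_mem_drop hx))
    intro hh
    rw [List.getLast_drop]
    exact Nat.getLast_digit_ne_zero 10 (by omega)
  have hlenh : (Nat.digits 10 (n / 10 ^ (l - hf))).length = hf := by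
    rw [hdigits_h, List.length_drop]
    omega
  have hbounds := len_to_bounds _ hf hlenh (by omega)
  refine ⟨⟨hbounds.1, hbounds.2⟩, ?_⟩
  set h := n / 10 ^ (l - hf) with hh
  set k := 2 * hf - l with hk2
  have hh0 : 0 < h := lt_of_lt_of_le (by positivity) hbounds.1
  have hdivk : Nat.digits 10 (h / 10 ^ k) = d.drop hf := by
    have hk01 : k = 0 ∨ k = 1 := by omega
    rcases hk01 with h0 | h1
    · rw [h0, pow_zero, Nat.div_one, hdigits_h]
      congr 1
      omega
    · have hcons := Nat.digits_def' (by omega : (1:ℕ) < 10) hh0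
      rw [hdigits_h] at hcons
      have htail : Nat.digits 10 (h / 10) = (d.drop (l - hf)).tail := by rw [hcons]; rfl
      rw [h1, pow_one, htail, List.tail_drop]
      first
      | rfl
      | (congr 1; omega)
  have hmir : mirN l h = h * 10 ^ (l - hf) + Nat.ofDigits 10 (Nat.digits 10 (h / 10 ^ k)).reverse := rfl
  rw [hmir, hdivk]
  have hdt : (d.drop hf).reverse = d.take (l - hf) := by
    rw [List.reverse_drop, ← hpal]
  rw [hdt, hdivh]
  conv_rhs => rw [hsplit]
  ring


-- ---------- list-level shape of the two ports ----------

theorem A_filter (M : ℤ) :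
    PalindromesInBothBases M = (PySem.List.pyRange 1 M 1).filter isPalindromeInBothBases := by
  rw [PalindromesInBothBases]
  have := PySem.List.foldl_append_if isPalindromeInBothBases (fun i => i)
    (PySem.List.pyRange 1 M 1) []
  simpa using this

def halfI (L : ℤ) : ℤ := PySem.Int.floordiv (L + 1) 2

def pEI (L h : ℤ) : ℤ :=
  h * 10 ^ (L - halfI L).toNat + pyRev (PySem.Int.floordiv h (10 ^ (2 * halfI L - L).toNat)) 10

def blk (M L : ℤ) : List ℤ :=
  ((PySem.List.pyRange (10 ^ (halfI L - 1).toNat) (10 ^ (halfI L).toNat) 1).filter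
    (fun h => decide (pEI L h < M) && (pyRev (pEI L h) 2 == pEI L h))).map (fun h => pEI L h)

theorem B_flat (M : ℤ) :
    PalindromesInBothBases_alt M =
      (PySem.List.pyRange 1 (PySem.Str.len (PySem.Int.toStr (M - 1)) + 1) 1).flatMap
        (fun L => blk M L) := by
  rw [PalindromesInBothBases_alt]
  simp only [PySem.List.foldl_append_if, PySem.List.foldl_append_eq_flatMap]
  simp only [blk, pEI, halfI, List.nil_append]
  rfl

-- ---------- casting bridges between the Int-level port and the Nat-level mirror ----------

theorem halfI_cast (l : ℕ) : halfI (l : ℤ) = (((l + 1) / 2 : ℕ) : ℤ) := by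
  rw [halfI, show ((l : ℤ) + 1) = ((l + 1 : ℕ) : ℤ) by push_cast; ring,
    show (2 : ℤ) = ((2 : ℕ) : ℤ) from rfl, PySem.Int.floordiv_natCast]

theorem pEI_cast (l hn : ℕ) (hl : 1 ≤ l) : pEI (l : ℤ) (hn : ℤ) = (mirN l hn : ℤ) := by
  have hfle : (l + 1) / 2 ≤ l := by omega
  have h2 : l ≤ 2 * ((l + 1) / 2) := by omega
  rw [pEI, halfI_cast]
  rw [show ((l : ℤ) - (((l + 1) / 2 : ℕ) : ℤ)).toNat = l - (l + 1) / 2 by omega]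
  rw [show (2 * (((l + 1) / 2 : ℕ) : ℤ) - (l : ℤ)).toNat = 2 * ((l + 1) / 2) - l by omega]
  rw [show (10 : ℤ) ^ (2 * ((l + 1) / 2) - l) = ((10 ^ (2 * ((l + 1) / 2) - l) : ℕ) : ℤ) by push_cast; ring]
  rw [PySem.Int.floordiv_natCast]
  rw [show (10 : ℤ) = ((10 : ℕ) : ℤ) from rfl, pyRev_eq 10 _ (by omega)]
  rw [mirN]
  push_cast
  ring

theorem rev2_fix_iff (n : ℕ) (hn : 0 < n) :
    (pyRev ((n : ℕ) : ℤ) 2 == ((n : ℕ) : ℤ)) = true ↔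
      Nat.digits 2 n = (Nat.digits 2 n).reverse := by
  rw [show (2 : ℤ) = ((2 : ℕ) : ℤ) from rfl, pyRev_eq 2 n le_rfl, beq_iff_eq,
    Nat.cast_inj]
  exact rev_fixed_iff 2 n (by omega) hn

theorem toDigits_length_eq (n : ℕ) (hn : 0 < n) :
    (Nat.toDigits 10 n).length = (Nat.digits 10 n).length := by
  rw [toDigits_eq 10 (by omega) n hn, List.length_reverse, List.length_map]

theorem ndI_eq (M : ℤ) (hM : 2 ≤ M) :
    PySem.Str.len (PySem.Int.toStr (M - 1)) = ((Nat.digits 10 (M - 1).toNat).length : ℤ) := by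
  have h0 : 0 < (M - 1).toNat := by omega
  rw [PySem.Str.len, show (M - 1) = (((M - 1).toNat : ℕ) : ℤ) by omega, toStr_toList,
    toDigits_length_eq _ h0]
  simp

-- membership in one block, in Nat terms
theorem blk_mem_iff (M x : ℤ) (l : ℕ) (hl : 1 ≤ l) :
    x ∈ blk M (l : ℤ) ↔ ∃ hn : ℕ,
      10 ^ ((l + 1) / 2 - 1) ≤ hn ∧ hn < 10 ^ ((l + 1) / 2) ∧
      x = (mirN l hn : ℤ) ∧ x < M ∧ (pyRev x 2 == x) = true := by
  have hf1 : 1 ≤ (l + 1) / 2 := by omega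
  have hcast1 : (10 : ℤ) ^ (halfI (l : ℤ) - 1).toNat = ((10 ^ ((l + 1) / 2 - 1) : ℕ) : ℤ) := by
    rw [halfI_cast, show ((((l + 1) / 2 : ℕ) : ℤ) - 1).toNat = (l + 1) / 2 - 1 by omega]
    push_cast
    ring
  have hcast2 : (10 : ℤ) ^ (halfI (l : ℤ)).toNat = ((10 ^ ((l + 1) / 2) : ℕ) : ℤ) := by
    rw [halfI_cast, Int.toNat_natCast]
    push_cast
    ring
  rw [blk]
  constructor
  · intro hx
    obtain ⟨h, hh, hxe⟩ := List.mem_map.mp hx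
    have hcond := List.of_mem_filter hh
    have hrange := List.mem_of_mem_filter hh
    rw [PySem.List.mem_pyRange_one, hcast1, hcast2] at hrange
    have hpos : 0 ≤ h := le_trans (by positivity) hrange.1
    have hhn : h = (h.toNat : ℤ) := by omega
    rw [hhn] at hrange hxe hcond
    simp only [Bool.and_eq_true, decide_eq_true_eq] at hcond
    refine ⟨h.toNat, by exact_mod_cast hrange.1, by exact_mod_cast hrange.2, ?_, ?_, ?_⟩
    · rw [← hxe, pEI_cast l h.toNat hl]
    · rw [← hxe]; exact hcond.1
    · rw [← hxe]; exact hcond.2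
  · rintro ⟨hn, hlo, hhi, hxe, hxM, hrev⟩
    apply List.mem_map.mpr
    refine ⟨(hn : ℤ), ?_, ?_⟩
    · apply List.mem_filter.mpr
      constructor
      · rw [PySem.List.mem_pyRange_one, hcast1, hcast2]
        exact ⟨by exact_mod_cast hlo, by exact_mod_cast hhi⟩
      · rw [pEI_cast l hn hl, ← hxe]
        simp only [Bool.and_eq_true, decide_eq_true_eq]
        exact ⟨hxM, hrev⟩
    · rw [pEI_cast l hn hl, ← hxe]


-- ---------- ordering ----------

theorem pE_mono (l a b : ℕ) (hl : 1 ≤ l)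
    (ha1 : 10 ^ ((l + 1) / 2 - 1) ≤ a) (ha2 : a < 10 ^ ((l + 1) / 2))
    (hb1 : 10 ^ ((l + 1) / 2 - 1) ≤ b) (hb2 : b < 10 ^ ((l + 1) / 2))
    (hab : a < b) : mirN l a < mirN l b := by
  have h1 := mirN_lt l a hl ha1 ha2
  have h2 := mirN_lt l b hl hb1 hb2
  have h3 : (a + 1) * 10 ^ (l - (l + 1) / 2) ≤ b * 10 ^ (l - (l + 1) / 2) :=
    Nat.mul_le_mul_right _ (by omega)
  omega

theorem blk_bounds (M : ℤ) (l : ℕ) (hl : 1 ≤ l) (x : ℤ) (hx : x ∈ blk M (l : ℤ)) :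
    ((10 : ℤ)) ^ (l - 1) ≤ x ∧ x < 10 ^ l := by
  obtain ⟨hn, hlo, hhi, hxe, -, -⟩ := (blk_mem_iff M x l hl).mp hx
  have hlen := length_digits_mirN l hn hl hlo hhi
  have hb := len_to_bounds (mirN l hn) l hlen hl
  rw [hxe]
  constructor
  · calc ((10 : ℤ)) ^ (l - 1) = ((10 ^ (l - 1) : ℕ) : ℤ) := by push_cast; ring
      _ ≤ (mirN l hn : ℤ) := by exact_mod_cast hb.1
  · calc (mirN l hn : ℤ) < ((10 ^ l : ℕ) : ℤ) := by exact_mod_cast hb.2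
      _ = (10 : ℤ) ^ l := by push_cast; ring

theorem pairwise_B (M : ℤ) :
    List.Pairwise (· < ·)
      ((PySem.List.pyRange 1 (PySem.Str.len (PySem.Int.toStr (M - 1)) + 1) 1).flatMap
        (fun L => blk M L)) := by
  rw [List.pairwise_flatMap]
  constructor
  · intro L hL
    have hL1 : 1 ≤ L := ((PySem.List.mem_pyRange_one).mp hL).1
    have hLc : ((L.toNat : ℕ) : ℤ) = L := by omega
    rw [← hLc, blk, List.pairwise_map]
    have hf1 : 1 ≤ (L.toNat + 1) / 2 := by omega
    have hcast1 : (10 : ℤ) ^ (halfI ((L.toNat : ℕ) : ℤ) - 1).toNat = ((10 ^ ((L.toNat + 1) / 2 - 1) : ℕ) : ℤ) := by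
      rw [halfI_cast, show ((((L.toNat + 1) / 2 : ℕ) : ℤ) - 1).toNat = (L.toNat + 1) / 2 - 1 by omega]
      push_cast; ring
    have hcast2 : (10 : ℤ) ^ (halfI ((L.toNat : ℕ) : ℤ)).toNat = ((10 ^ ((L.toNat + 1) / 2) : ℕ) : ℤ) := by
      rw [halfI_cast, Int.toNat_natCast]; push_cast; ring
    apply List.Pairwise.imp_of_mem ?_ ((PySem.List.pairwise_lt_pyRange_one _ _).filter _)
    intro a b hma hmb hab
    have hra := (PySem.List.mem_pyRange_one).mp (List.mem_of_mem_filter hma)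
    have hrb := (PySem.List.mem_pyRange_one).mp (List.mem_of_mem_filter hmb)
    rw [hcast1, hcast2] at hra hrb
    have hpa : 0 ≤ a := le_trans (by positivity) hra.1
    have hpb : 0 ≤ b := le_trans (by positivity) hrb.1
    have hac : a = ((a.toNat : ℕ) : ℤ) := by omega
    have hbc : b = ((b.toNat : ℕ) : ℤ) := by omega
    rw [hac, hbc, pEI_cast _ _ (by omega), pEI_cast _ _ (by omega)]
    have := pE_mono L.toNat a.toNat b.toNat (by omega)
      (by exact_mod_cast hac ▸ hra.1) (by exact_mod_cast hac ▸ hra.2)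
      (by exact_mod_cast hbc ▸ hrb.1) (by exact_mod_cast hbc ▸ hrb.2)
      (by omega)
    exact_mod_cast this
  · apply List.Pairwise.imp_of_mem ?_ (PySem.List.pairwise_lt_pyRange_one _ _)
    intro L1 L2 hm1 hm2 h12 x hx y hy
    have hL1 : 1 ≤ L1 := ((PySem.List.mem_pyRange_one).mp hm1).1
    have hL2 : 1 ≤ L2 := ((PySem.List.mem_pyRange_one).mp hm2).1
    have hc1 : ((L1.toNat : ℕ) : ℤ) = L1 := by omega
    have hc2 : ((L2.toNat : ℕ) : ℤ) = L2 := by omega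
    have hbx := blk_bounds M L1.toNat (by omega) x (by rw [hc1]; exact hx)
    have hby := blk_bounds M L2.toNat (by omega) y (by rw [hc2]; exact hy)
    have hpow : (10 : ℤ) ^ L1.toNat ≤ 10 ^ (L2.toNat - 1) :=
      pow_le_pow_right₀ (by omega) (by omega)
    calc x < 10 ^ L1.toNat := hbx.2
      _ ≤ 10 ^ (L2.toNat - 1) := hpow
      _ ≤ y := hby.1

-- ---------- membership, both sides ----------

theorem mem_B_iff (M x : ℤ) (hM : 0 < M) :
    (x ∈ (PySem.List.pyRange 1 (PySem.Str.len (PySem.Int.toStr (M - 1)) + 1) 1).flatMap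
        (fun L => blk M L)) ↔
      (1 ≤ x ∧ x < M ∧ Nat.digits 2 x.toNat = (Nat.digits 2 x.toNat).reverse ∧
        Nat.digits 10 x.toNat = (Nat.digits 10 x.toNat).reverse) := by
  rw [List.mem_flatMap]
  constructor
  · rintro ⟨L, hLmem, hxblk⟩
    have hL1 : 1 ≤ L := ((PySem.List.mem_pyRange_one).mp hLmem).1
    have hLc : ((L.toNat : ℕ) : ℤ) = L := by omega
    rw [← hLc] at hxblk
    obtain ⟨hn, hlo, hhi, hxe, hxM, hrev⟩ := (blk_mem_iff M x L.toNat (by omega)).mp hxblk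
    have hlen := length_digits_mirN L.toNat hn (by omega) hlo hhi
    have hb := len_to_bounds (mirN L.toNat hn) L.toNat hlen (by omega)
    have hx1 : 1 ≤ x := by
      rw [hxe]
      have : (1 : ℕ) ≤ mirN L.toNat hn := le_trans (Nat.one_le_pow _ _ (by omega)) hb.1
      exact_mod_cast this
    have hxt : x.toNat = mirN L.toNat hn := by omega
    have hpos : 0 < x.toNat := by omega
    refine ⟨hx1, hxM, ?_, ?_⟩
    · rw [← rev2_fix_iff x.toNat hpos]
      rw [show ((x.toNat : ℕ) : ℤ) = x by omega]
      exact hrev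
    · rw [hxt]
      exact pal_digits_mirN L.toNat hn (by omega) hlo hhi
  · rintro ⟨hx1, hxM, hpal2, hpal10⟩
    have hpos : 0 < x.toNat := by omega
    have hM2 : 2 ≤ M := by omega
    obtain ⟨⟨hlo, hhi⟩, hmir⟩ := exists_half x.toNat hpos hpal10
    set l := (Nat.digits 10 x.toNat).length with hldef
    have hl1 : 1 ≤ l := by
      have hne : Nat.digits 10 x.toNat ≠ [] := Nat.digits_ne_nil_iff_ne_zero.mpr (by omega)
      have := List.length_pos_of_ne_nil hne
      omega
    refine ⟨(l : ℤ), ?_, ?_⟩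
    · rw [PySem.List.mem_pyRange_one, ndI_eq M hM2]
      constructor
      · exact_mod_cast hl1
      · have hxle : x.toNat ≤ (M - 1).toNat := by omega
        have hndlen : (M - 1).toNat < 10 ^ (Nat.digits 10 (M - 1).toNat).length :=
          (Nat.digits_length_le_iff (by omega) _).mp le_rfl
        have : l ≤ (Nat.digits 10 (M - 1).toNat).length :=
          (Nat.digits_length_le_iff (by omega) _).mpr (by omega)
        omega
    · rw [blk_mem_iff M x l hl1]
      refine ⟨x.toNat / 10 ^ (l - (l + 1) / 2), hlo, hhi, ?_, hxM, ?_⟩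
      · rw [hmir]; omega
      · rw [← rev2_fix_iff x.toNat hpos] at hpal2
        rw [show ((x.toNat : ℕ) : ℤ) = x by omega] at hpal2
        exact hpal2

theorem mem_A_iff (M x : ℤ) :
    x ∈ (PySem.List.pyRange 1 M 1).filter isPalindromeInBothBases ↔
      (1 ≤ x ∧ x < M ∧ Nat.digits 2 x.toNat = (Nat.digits 2 x.toNat).reverse ∧
        Nat.digits 10 x.toNat = (Nat.digits 10 x.toNat).reverse) := by
  rw [List.mem_filter, PySem.List.mem_pyRange_one]
  constructor
  · rintro ⟨⟨h1, h2⟩, hp⟩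
    have hpos : 0 < x.toNat := by omega
    rw [show x = ((x.toNat : ℕ) : ℤ) by omega, predA_iff x.toNat hpos] at hp
    exact ⟨h1, h2, hp.1, hp.2⟩
  · rintro ⟨h1, h2, hp2, hp10⟩
    have hpos : 0 < x.toNat := by omega
    refine ⟨⟨h1, h2⟩, ?_⟩
    rw [show x = ((x.toNat : ℕ) : ℤ) by omega, predA_iff x.toNat hpos]
    exact ⟨hp2, hp10⟩

theorem main_lemma (maximum : Int) (hpre : Pre_PalindromesInBothBases maximum) :
    PalindromesInBothBases maximum = PalindromesInBothBases_alt maximum := by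
  obtain ⟨hM, -⟩ := hpre
  rw [A_filter, B_flat]
  have pwA : List.Pairwise (· < ·) ((PySem.List.pyRange 1 maximum 1).filter isPalindromeInBothBases) :=
    (PySem.List.pairwise_lt_pyRange_one _ _).filter _
  have pwB := pairwise_B maximum
  have hmem : ∀ y, y ∈ (PySem.List.pyRange 1 maximum 1).filter isPalindromeInBothBases ↔
      y ∈ (PySem.List.pyRange 1 (PySem.Str.len (PySem.Int.toStr (maximum - 1)) + 1) 1).flatMap
        (fun L => blk maximum L) := by
    intro y
    rw [mem_A_iff, mem_B_iff maximum y hM]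
  exact List.Perm.eq_of_pairwise
    (fun a b _ _ h1 h2 => absurd h2 (lt_asymm h1)) pwA pwB
    ((List.perm_ext_iff_of_nodup pwA.nodup pwB.nodup).mpr hmem)

-- ===== VERDICT (by name: the statement is the Claim_ definition above) =====
theorem PalindromesInBothBases_spec : Claim_equal_PalindromesInBothBases :=
  fun maximum _ hpre => main_lemma maximum hpre
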